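-- pv_equiv track=rewrite | github.com/JuniorDevNam/Python | Lớp 11/Kiểm tra - BT kiểu trong Python/Câu 4/4.py | kt_cdn
-- ===== SOURCE A (Python) =====
-- def kt_cdn(s):
--     a = s.split()
--     b = []
--     c = len(max(a, key= len ))
--     for x in a:
--         if len(x) == c:
--             b.append(x)
--     b = ", ".join(str(d) for d in b)
--     return b
-- ===== SOURCE B (Python) =====
-- def kt_cdn(s):
--     best_len = 0
--     best = []
--     for x in s.split():
--         n = len(x)
--         if n > best_len:
--             best_len = n
--             best = [x]
--         elif n == best_len:
--             best.append(x)
--     return ", ".join(best)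
-- ===== Notes on version B (the rewrite author's own statement) =====
-- stated objective: alternative
-- what changed: Replaced A's two passes (max(a, key=len) to find the longest length, then a filtering loop) by a single pass that maintains a running best length and the list of words achieving it; B returns "" instead of raising on whitespace-only input.
-- outside the precondition, e.g. on kt_cdn(''): A raises ValueError, B returns ''
import Mathlib
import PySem

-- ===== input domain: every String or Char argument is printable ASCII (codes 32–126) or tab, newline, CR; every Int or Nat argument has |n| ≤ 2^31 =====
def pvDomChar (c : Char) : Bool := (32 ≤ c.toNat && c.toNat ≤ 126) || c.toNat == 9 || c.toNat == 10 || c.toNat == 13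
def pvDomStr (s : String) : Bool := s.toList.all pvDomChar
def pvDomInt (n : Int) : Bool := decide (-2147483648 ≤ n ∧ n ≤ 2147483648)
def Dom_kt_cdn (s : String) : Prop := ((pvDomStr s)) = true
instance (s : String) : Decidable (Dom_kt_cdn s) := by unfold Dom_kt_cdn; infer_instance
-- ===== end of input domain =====

-- B replaces A's two passes (max by len, then a filter loop) by one pass keeping a
-- running best length and the words achieving it; same result wherever A returns.

-- ===== PORT A =====
-- a = s.split(); c = len(max(a, key=len)); collect words with len == c; join with ", ".
-- (max of the empty list raises ValueError in Python: that input is outside Pre_;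
--  the `none` branch here returns a dummy "" and is never reached under Pre_.)
def kt_cdn (s : String) : String :=
  let a := PySem.Str.split₀ s
  match PySem.List.max? a (fun x => PySem.Str.len x) with
  | none => ""
  | some m =>
    let c := PySem.Str.len m
    let b := a.foldl (fun b x => if PySem.Str.len x == c then b ++ [x] else b) ([] : List String)
    PySem.Str.join ", " b

-- ===== PORT B =====
-- one pass: (best_len, best) updated per word; join at the end ("" if no words).
def kt_cdn_alt (s : String) : String :=
  let st := (PySem.Str.split₀ s).foldl
    (fun (p : Int × List String) x =>
      let n := PySem.Str.len x
      if n > p.1 then (n, [x])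
      else if n == p.1 then (p.1, p.2 ++ [x])
      else p)
    ((0 : Int), ([] : List String))
  PySem.Str.join ", " st.2

-- ===== PRECONDITION & SPEC =====
-- Pre_ excludes exactly the inputs with no words (empty / all-whitespace s), on which
-- Python A raises ValueError (max() of an empty sequence).
def Pre_kt_cdn (s : String) : Prop := PySem.Str.split₀ s ≠ []
instance (s : String) : Decidable (Pre_kt_cdn s) := by unfold Pre_kt_cdn; infer_instance
def pvWitness_kt_cdn : String := "ab cd e"

def Spec_kt_cdn (s : String) (out : String) : Prop := out = kt_cdn_alt s
instance (s : String) (out : String) : Decidable (Spec_kt_cdn s out) := by unfold Spec_kt_cdn; infer_instance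

-- ===== CLAIM (what is proved, stated in full; the proofs are below) =====
def Claim_equal_kt_cdn : Prop := ∀ (s : String), Dom_kt_cdn s → Pre_kt_cdn s → Spec_kt_cdn s (kt_cdn s)

-- ===== LEMMAS AND PROOFS =====
-- All loop lemmas are stated for a generic key f : String → Int (instantiated with
-- PySem.Str.len in the verdict) so that simp normalisation cannot interfere.

theorem foldl_max_le (f : String → Int) (ws : List String) (m K : Int) (hm : m ≤ K)
    (h : ∀ y ∈ ws, f y ≤ K) :
    ws.foldl (fun acc x => max acc (f x)) m ≤ K := by
  induction ws generalizing m with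
  | nil => simpa using hm
  | cons x t ih =>
    exact ih _ (max_le hm (h x (by simp))) (fun y hy => h y (by simp [hy]))

theorem le_foldl_max (f : String → Int) (ws : List String) (m : Int) :
    m ≤ ws.foldl (fun acc x => max acc (f x)) m := by
  induction ws generalizing m with
  | nil => simp
  | cons x t ih => exact le_trans (le_max_left _ _) (ih _)

theorem mem_le_foldl_max (f : String → Int) (ws : List String) (m : Int)
    (x : String) (hx : x ∈ ws) :
    f x ≤ ws.foldl (fun acc x => max acc (f x)) m := by
  induction ws generalizing m with
  | nil => simp at hx
  | cons y t ih =>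
    rcases List.mem_cons.mp hx with h | h
    · subst h; exact le_trans (le_max_right m (f x)) (le_foldl_max f t _)
    · exact le_trans (ih (max m (f y)) h) (le_of_eq rfl)

-- A's collecting loop is a filter
theorem afold_eq_filter (f : String → Int) (ws : List String) (c : Int) (b : List String) :
    ws.foldl (fun b x => if f x == c then b ++ [x] else b) b
      = b ++ ws.filter (fun x => f x == c) := by
  induction ws generalizing b with
  | nil => simp
  | cons x t ih =>
    simp only [List.foldl_cons, List.filter_cons]
    by_cases h : (f x == c) = true
    · rw [if_pos h, if_pos h, ih]; simp
    · rw [if_neg h, if_neg h, ih]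

-- B's one-pass loop computes the running max and the words achieving it
theorem bfold_spec (f : String → Int) (ws : List String) (m : Int) (b : List String) :
    ws.foldl
      (fun (p : Int × List String) x =>
        let n := f x
        if n > p.1 then (n, [x])
        else if n == p.1 then (p.1, p.2 ++ [x])
        else p)
      (m, b)
    = (ws.foldl (fun acc x => max acc (f x)) m,
       (if ws.foldl (fun acc x => max acc (f x)) m = m then b else [])
         ++ ws.filter (fun x => f x == ws.foldl (fun acc x => max acc (f x)) m)) := by
  induction ws generalizing m b with
  | nil => simp
  | cons x t ih =>
    simp only [List.foldl_cons, List.filter_cons]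
    by_cases hgt : f x > m
    · have hmax : max m (f x) = f x := by omega
      rw [if_pos hgt, ih]
      simp only [hmax]
      have hM := le_foldl_max f t (f x)
      have hMm : t.foldl (fun acc x => max acc (f x)) (f x) ≠ m := by omega
      by_cases hx : t.foldl (fun acc x => max acc (f x)) (f x) = f x
      · have hbeq : (f x == t.foldl (fun acc x => max acc (f x)) (f x)) = true := by
          simp only [beq_iff_eq]; omega
        rw [if_neg hMm, if_pos hbeq, if_pos hx]
        rfl
      · have hbeq : ¬ (f x == t.foldl (fun acc x => max acc (f x)) (f x)) = true := by
          simp only [beq_iff_eq]; omega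
        rw [if_neg hMm, if_neg hbeq, if_neg hx]
    · by_cases heq : f x = m
      · have hmax : max m (f x) = m := by omega
        rw [if_neg hgt, if_pos (by simpa using heq), ih]
        simp only [hmax]
        by_cases hx : t.foldl (fun acc x => max acc (f x)) m = m
        · have hbeq : (f x == t.foldl (fun acc x => max acc (f x)) m) = true := by
            simp [hx, heq]
          rw [if_pos hx, if_pos hx, if_pos hbeq]
          simp
        · have hM := le_foldl_max f t m
          have hbeq : ¬ (f x == t.foldl (fun acc x => max acc (f x)) m) = true := by
            simp only [beq_iff_eq]; omega
          rw [if_neg hx, if_neg hx, if_neg hbeq]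
      · have hlt : f x < m := by omega
        have hmax : max m (f x) = m := by omega
        have hne : ¬ (f x == m) = true := by simpa using heq
        rw [if_neg hgt, if_neg hne, ih]
        simp only [hmax]
        have hM := le_foldl_max f t m
        have hbeq : ¬ (f x == t.foldl (fun acc x => max acc (f x)) m) = true := by
          simp only [beq_iff_eq]; omega
        rw [if_neg hbeq]

-- ===== VERDICT (by name: the statement is the Claim_ definition above) =====
theorem kt_cdn_spec : Claim_equal_kt_cdn := by
  intro s _ hpre
  unfold Spec_kt_cdn kt_cdn kt_cdn_alt
  set a := PySem.Str.split₀ s with ha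
  cases hmax : PySem.List.max? a (fun x => PySem.Str.len x) with
  | none => exact absurd ((PySem.List.max?_eq_none_iff a _).mp hmax) hpre
  | some m =>
    simp only [hmax]
    rw [afold_eq_filter PySem.Str.len, bfold_spec PySem.Str.len]
    have hmem := PySem.List.max?_mem hmax
    have hub := PySem.List.max?_isMax hmax
    have h0 : (0 : Int) ≤ PySem.Str.len m := by
      rw [PySem.Str.len_eq]; positivity
    have hle : a.foldl (fun acc x => max acc (PySem.Str.len x)) 0 ≤ PySem.Str.len m :=
      foldl_max_le PySem.Str.len a 0 _ h0 hub
    have hge : PySem.Str.len m ≤ a.foldl (fun acc x => max acc (PySem.Str.len x)) 0 :=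
      mem_le_foldl_max PySem.Str.len a 0 m hmem
    have hcM : PySem.Str.len m = a.foldl (fun acc x => max acc (PySem.Str.len x)) 0 :=
      le_antisymm hge hle
    rw [← hcM, ite_self]
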